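-- pv_equiv track=rewrite | github.com/ToniaEB/fcs | ass2.py | list_jumps
-- ===== SOURCE A (Python) =====
-- def list_jumps(jumps):
--   index = 0
--   n = len(jumps)
--   visited = set()
--
--   while 0 <= index < n:
--     if index in visited:
--       return "cycle"
--
--     visited.add(index)
--     next_index = index + jumps[index]
--
--     if next_index < 0 or next_index >= n:
--       return "out-of-bounds"
--
--     index = next_index
--
--     # Additional check for a special case where the jump takes you back to the same index
--     if jumps[index] == 0:
--       return "cycle"
--
--   return "out-of-bounds"
-- ===== SOURCE B (Python) =====
-- def list_jumps(jumps):
--   n = len(jumps)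
--   index = 0
--   for _ in range(n + 1):
--     if not 0 <= index < n:
--       return "out-of-bounds"
--     index += jumps[index]
--   return "cycle"
-- ===== Notes on version B (the rewrite author's own statement) =====
-- stated objective: simpler
-- what changed: Replaces the visited-set bookkeeping, the explicit out-of-bounds test and the jumps[index]==0 shortcut by a bare bounded walk: follow the pointer for at most n+1 steps and report 'cycle' if the walk never left [0,n) (pigeonhole: n+1 in-range positions must repeat), 'out-of-bounds' otherwise.
import Mathlib
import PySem

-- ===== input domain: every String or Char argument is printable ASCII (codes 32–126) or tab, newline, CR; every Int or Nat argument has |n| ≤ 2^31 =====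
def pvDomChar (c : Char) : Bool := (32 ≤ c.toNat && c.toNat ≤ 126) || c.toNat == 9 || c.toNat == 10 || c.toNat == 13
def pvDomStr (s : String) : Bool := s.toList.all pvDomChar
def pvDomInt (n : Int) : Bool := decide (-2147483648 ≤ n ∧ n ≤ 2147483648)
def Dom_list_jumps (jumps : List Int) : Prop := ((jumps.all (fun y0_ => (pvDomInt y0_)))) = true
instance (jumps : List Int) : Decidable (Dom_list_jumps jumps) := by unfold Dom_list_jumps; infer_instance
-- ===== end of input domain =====

-- B drops A's visited set, out-of-bounds test and zero-jump shortcut: it just follows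
-- the pointer for at most n+1 steps and answers "cycle" iff it never left the range.

-- ===== PORT A =====
-- while-loop as fuel recursion; fuel jumps.length+1 suffices because the visited set
-- gains a new in-range index each iteration (the fuel-0 default is proved unreachable).
-- jumps[index] is only evaluated under the in-range checks, so pyGetD _ _ 0 is exact here.
def aLoop (jumps : List Int) : Nat → Int → PySem.Set Int → String
  | 0, _, _ => "out-of-bounds"
  | fuel+1, index, visited =>
    if 0 ≤ index ∧ index < (jumps.length : Int) then
      if PySem.Set.contains visited index then "cycle"
      else
        let visited' := PySem.Set.add visited index
        let next_index := index + PySem.List.pyGetD jumps index 0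
        if next_index < 0 ∨ next_index ≥ (jumps.length : Int) then "out-of-bounds"
        else if PySem.List.pyGetD jumps next_index 0 = 0 then "cycle"
        else aLoop jumps fuel next_index visited'
    else "out-of-bounds"

def list_jumps (jumps : List Int) : String :=
  aLoop jumps (jumps.length + 1) 0 PySem.Set.empty

-- ===== PORT B =====
-- Source B's for-loop over range(n+1) with its early return, as structural recursion on
-- the number of remaining iterations; falling off the loop yields "cycle".
def bWalk (jumps : List Int) : Nat → Int → String
  | 0, _ => "cycle"
  | k+1, index =>
    if 0 ≤ index ∧ index < (jumps.length : Int) then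
      bWalk jumps k (index + PySem.List.pyGetD jumps index 0)
    else "out-of-bounds"

def list_jumps_alt (jumps : List Int) : String :=
  bWalk jumps (jumps.length + 1) 0

-- ===== PRECONDITION & SPEC =====
def Spec_list_jumps (jumps : List Int) (out : String) : Prop := out = list_jumps_alt jumps
instance (jumps : List Int) (out : String) : Decidable (Spec_list_jumps jumps out) := by unfold Spec_list_jumps; infer_instance

-- ===== CLAIM (what is proved, stated in full; the proofs are below) =====
def Claim_equal_list_jumps : Prop := ∀ (jumps : List Int), Dom_list_jumps jumps → Spec_list_jumps jumps (list_jumps jumps)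

-- ===== LEMMAS AND PROOFS =====

-- one jump step, and the trajectory of indices it generates
def stepf (jumps : List Int) (i : Int) : Int := i + PySem.List.pyGetD jumps i 0

def traj (jumps : List Int) (i : Int) : Nat → Int
  | 0 => i
  | k+1 => traj jumps (stepf jumps i) k

def inR (jumps : List Int) (i : Int) : Prop := 0 ≤ i ∧ i < (jumps.length : Int)

theorem traj_succ (jumps : List Int) (i : Int) (k : Nat) :
    traj jumps i (k+1) = stepf jumps (traj jumps i k) := by
  induction k generalizing i with
  | zero => rfl
  | succ k ih => rw [traj, ih, traj]

theorem traj_shift (jumps : List Int) (i : Int) (p q : Nat)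
    (h : traj jumps i p = traj jumps i q) :
    ∀ m, traj jumps i (p+m) = traj jumps i (q+m) := by
  intro m
  induction m with
  | zero => simpa using h
  | succ m ih => rw [← Nat.add_assoc, ← Nat.add_assoc, traj_succ, traj_succ, ih]

-- after a repeat at p < q, every trajectory point already occurs before q
theorem traj_bounded_of_repeat (jumps : List Int) (i : Int) (p q : Nat)
    (hpq : p < q) (h : traj jumps i p = traj jumps i q) :
    ∀ k, ∃ k' < q, traj jumps i k = traj jumps i k' := by
  intro k
  induction k using Nat.strong_induction_on with
  | _ k ih =>
    by_cases hk : k < q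
    · exact ⟨k, hk, rfl⟩
    · push Not at hk
      have h1 : traj jumps i k = traj jumps i (p + (k - q)) := by
        have := traj_shift jumps i p q h (k - q)
        rw [Nat.add_sub_cancel' hk] at this
        exact this.symm
      obtain ⟨k', hk', he⟩ := ih (p + (k - q)) (by omega)
      exact ⟨k', hk', h1.trans he⟩

-- pigeonhole: a duplicate-free list of integers in [0, n) has length ≤ n
theorem nodup_length_le (n : Nat) (l : List Int) (hn : l.Nodup)
    (hb : ∀ j ∈ l, 0 ≤ j ∧ j < (n : Int)) : l.length ≤ n := by
  have h1 : l.toFinset.card = l.length := List.toFinset_card_of_nodup hn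
  have h2 : l.toFinset ⊆ Finset.Ico (0 : Int) (n : Int) := by
    intro x hx
    rw [List.mem_toFinset] at hx
    have := hb x hx
    simp [Finset.mem_Ico]; omega
  have h3 := Finset.card_le_card h2
  simp [Int.card_Ico] at h3
  omega

-- pigeonhole on the trajectory: n+1 in-range points must repeat
theorem exists_repeat (jumps : List Int) (i : Int)
    (hall : ∀ k ≤ jumps.length, inR jumps (traj jumps i k)) :
    ∃ p q, p < q ∧ q ≤ jumps.length ∧ traj jumps i p = traj jumps i q := by
  obtain ⟨a, ha, b, hb, hne, he⟩ :=
    Finset.exists_ne_map_eq_of_card_lt_of_maps_to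
      (s := Finset.range (jumps.length + 1)) (t := Finset.Ico (0 : Int) (jumps.length : Int))
      (by simp [Int.card_Ico])
      (fun k hk => by
        have := hall k (by simpa using Nat.lt_succ_iff.mp (Finset.mem_range.mp hk))
        exact Finset.mem_Ico.mpr this)
      (f := fun k => traj jumps i k)
  simp only [Finset.mem_range] at ha hb
  rcases Nat.lt_or_ge a b with h | h
  · exact ⟨a, b, h, by omega, he⟩
  · exact ⟨b, a, by omega, by omega, he.symm⟩

-- if the whole trajectory stays in range, B's walk exhausts its iterations: "cycle"
theorem bWalk_cycle (jumps : List Int) :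
    ∀ fuel (i : Int), (∀ k, k < fuel → inR jumps (traj jumps i k)) →
    bWalk jumps fuel i = "cycle" := by
  intro fuel
  induction fuel with
  | zero => intro i _; rfl
  | succ fuel ih =>
    intro i h
    have h0 : 0 ≤ i ∧ i < (jumps.length : Int) := h 0 (Nat.succ_pos _)
    simp only [bWalk]
    rw [if_pos h0]
    exact ih _ (fun k hk => h (k+1) (by omega))

-- if the trajectory first leaves the range at step k0 < fuel, B answers "out-of-bounds"
theorem bWalk_oob (jumps : List Int) :
    ∀ k0 (i : Int) fuel, k0 < fuel → ¬ inR jumps (traj jumps i k0) →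
    (∀ j, j < k0 → inR jumps (traj jumps i j)) →
    bWalk jumps fuel i = "out-of-bounds" := by
  intro k0
  induction k0 with
  | zero =>
    intro i fuel hf h0 _
    obtain ⟨fuel, rfl⟩ := Nat.exists_eq_succ_of_ne_zero (by omega : fuel ≠ 0)
    have h0' : ¬(0 ≤ i ∧ i < (jumps.length : Int)) := h0
    simp only [bWalk]
    rw [if_neg h0']
  | succ k0 ih =>
    intro i fuel hf hk hmin
    obtain ⟨fuel, rfl⟩ := Nat.exists_eq_succ_of_ne_zero (by omega : fuel ≠ 0)
    have h0 : 0 ≤ i ∧ i < (jumps.length : Int) := hmin 0 (Nat.succ_pos _)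
    simp only [bWalk]
    rw [if_pos h0]
    exact ih _ fuel (by omega) hk (fun j hj => hmin (j+1) (by omega))

-- if the whole trajectory stays in range, A eventually revisits an index: "cycle"
theorem aLoop_cycle (jumps : List Int) :
    ∀ fuel (index : Int) (visited : List Int),
    visited.Nodup → (∀ v ∈ visited, inR jumps v) →
    jumps.length + 1 ≤ fuel + visited.length →
    (∀ k, inR jumps (traj jumps index k)) →
    aLoop jumps fuel index visited = "cycle" := by
  intro fuel
  induction fuel with
  | zero =>
    intro index visited hnd hb hf _
    exfalso
    have := nodup_length_le jumps.length visited hnd (fun j hj => hb j hj)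
    omega
  | succ fuel ih =>
    intro index visited hnd hb hf hall
    have h0 : 0 ≤ index ∧ index < (jumps.length : Int) := hall 0
    simp only [aLoop]
    rw [if_pos h0]
    by_cases hmem : index ∈ visited
    · rw [if_pos (by simp [PySem.Set.contains]; exact hmem)]
    · rw [if_neg (by simp [PySem.Set.contains]; exact hmem)]
      have h1 : inR jumps (index + PySem.List.pyGetD jumps index 0) := by
        have := hall 1
        rw [show traj jumps index 1 = stepf jumps index from rfl] at this
        exact this
      rw [if_neg (by unfold inR at h1; omega)]
      by_cases hz : PySem.List.pyGetD jumps (index + PySem.List.pyGetD jumps index 0) 0 = 0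
      · rw [if_pos hz]
      · rw [if_neg hz]
        have hadd : PySem.Set.add visited index = visited ++ [index] := by
          simp [PySem.Set.add, PySem.Set.contains, hmem]
        rw [hadd]
        apply ih
        · exact ((List.perm_append_singleton index visited).nodup_iff).mpr
            (List.nodup_cons.mpr ⟨hmem, hnd⟩)
        · intro v hv
          rcases List.mem_append.mp hv with h | h
          · exact hb v h
          · simp at h; subst h; exact h0
        · simp; omega
        · intro k
          have := hall (k+1)
          rwa [show traj jumps index (k+1) = traj jumps (stepf jumps index) k from rfl] at this
-- (stepf jumps index is definitionally index + pyGetD jumps index 0)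

-- if the trajectory first exits at k0, no revisit or zero-jump can fire earlier: "out-of-bounds"
theorem aLoop_oob (jumps : List Int) :
    ∀ k0 (index : Int) (visited : List Int) fuel, k0 < fuel →
    ¬ inR jumps (traj jumps index k0) →
    (∀ j, j < k0 → inR jumps (traj jumps index j)) →
    (∀ p q, p < q → q ≤ k0 → traj jumps index p ≠ traj jumps index q) →
    (∀ v ∈ visited, ∀ j, j ≤ k0 → traj jumps index j ≠ v) →
    aLoop jumps fuel index visited = "out-of-bounds" := by
  intro k0
  induction k0 with
  | zero =>
    intro index visited fuel hf h0 _ _ _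
    obtain ⟨fuel, rfl⟩ := Nat.exists_eq_succ_of_ne_zero (by omega : fuel ≠ 0)
    have h0' : ¬(0 ≤ index ∧ index < (jumps.length : Int)) := h0
    simp only [aLoop]
    rw [if_neg h0']
  | succ k0 ih =>
    intro index visited fuel hf hk hmin hnr hvis
    obtain ⟨fuel, rfl⟩ := Nat.exists_eq_succ_of_ne_zero (by omega : fuel ≠ 0)
    have h0 : 0 ≤ index ∧ index < (jumps.length : Int) := hmin 0 (Nat.succ_pos _)
    have hmem : index ∉ visited := fun h => hvis index h 0 (by omega) rfl
    simp only [aLoop]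
    rw [if_pos h0, if_neg (by simp [PySem.Set.contains]; exact hmem)]
    have htr1 : traj jumps index 1 = index + PySem.List.pyGetD jumps index 0 := rfl
    by_cases hoob : index + PySem.List.pyGetD jumps index 0 < 0 ∨
        index + PySem.List.pyGetD jumps index 0 ≥ (jumps.length : Int)
    · rw [if_pos hoob]
    · rw [if_neg hoob]
      -- the step stayed in range, so the exit step k0+1 is ≥ 2, i.e. k0 ≥ 1
      have hk0pos : 1 ≤ k0 := by
        by_contra h
        have : k0 = 0 := by omega
        subst this
        exact hk (by rw [htr1]; unfold inR; omega)
      have hz : ¬ PySem.List.pyGetD jumps (index + PySem.List.pyGetD jumps index 0) 0 = 0 := by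
        intro hz0
        -- a zero jump at traj 1 makes traj 2 = traj 1, a repeat within k0+1
        have h12 : traj jumps index 1 = traj jumps index 2 := by
          rw [show (2:Nat) = 1 + 1 from rfl, traj_succ jumps index 1, htr1]
          unfold stepf
          rw [hz0]
          ring
        exact hnr 1 2 (by omega) (by omega) h12
      rw [if_neg hz]
      have hadd : PySem.Set.add visited index = visited ++ [index] := by
        simp [PySem.Set.add, PySem.Set.contains, hmem]
      rw [hadd]
      have hshift : ∀ j, traj jumps (index + PySem.List.pyGetD jumps index 0) j
          = traj jumps index (j+1) := fun j => rfl
      apply ih _ _ fuel (by omega)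
      · rw [hshift]; exact hk
      · intro j hj; rw [hshift]; exact hmin (j+1) (by omega)
      · intro p q hpq hq; rw [hshift, hshift]
        exact hnr (p+1) (q+1) (by omega) (by omega)
      · intro v hv j hj
        rw [hshift]
        rcases List.mem_append.mp hv with h | h
        · exact hvis v h (j+1) (by omega)
        · simp at h; subst h
          exact fun he => hnr 0 (j+1) (by omega) (by omega) he.symm

-- ===== VERDICT (by name: the statement is the Claim_ definition above) =====
theorem list_jumps_spec : Claim_equal_list_jumps := by
  intro jumps _
  unfold Spec_list_jumps list_jumps list_jumps_alt
  by_cases hP : ∀ k, k ≤ jumps.length → inR jumps (traj jumps 0 k)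
  · -- the first n+1 trajectory points are in range: a repeat exists, so the
    -- trajectory stays in range forever and both programs answer "cycle"
    obtain ⟨p, q, hpq, hq, he⟩ := exists_repeat jumps 0 hP
    have hall : ∀ k, inR jumps (traj jumps 0 k) := by
      intro k
      obtain ⟨k', hk', heq⟩ := traj_bounded_of_repeat jumps 0 p q hpq he k
      rw [heq]
      exact hP k' (by omega)
    have hA := aLoop_cycle jumps (jumps.length + 1) 0 [] List.nodup_nil (by simp) (by simp) hall
    have hB := bWalk_cycle jumps (jumps.length + 1) 0 (fun k _ => hall k)
    rw [hB]
    simpa [PySem.Set.empty] using hA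
  · -- some point among the first n+1 leaves the range: take the first one
    push Not at hP
    have hex : ∃ k, ¬ inR jumps (traj jumps 0 k) := by
      obtain ⟨k, _, hk⟩ := hP; exact ⟨k, hk⟩
    classical
    have hk0 : ¬ inR jumps (traj jumps 0 (Nat.find hex)) := Nat.find_spec hex
    have hmin : ∀ j, j < Nat.find hex → inR jumps (traj jumps 0 j) :=
      fun j hj => not_not.mp (Nat.find_min hex hj)
    have hk0le : Nat.find hex ≤ jumps.length := by
      obtain ⟨k, hkle, hnk⟩ := hP
      exact le_trans (Nat.find_min' hex hnk) hkle
    have hnr : ∀ p q, p < q → q ≤ Nat.find hex → traj jumps 0 p ≠ traj jumps 0 q := by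
      intro p q hpq hq he
      obtain ⟨k', hk', heq⟩ := traj_bounded_of_repeat jumps 0 p q hpq he (Nat.find hex)
      exact hk0 (heq ▸ hmin k' (by omega))
    have hA := aLoop_oob jumps (Nat.find hex) 0 [] (jumps.length + 1) (by omega) hk0 hmin hnr (by simp)
    have hB := bWalk_oob jumps (Nat.find hex) 0 (jumps.length + 1) (by omega) hk0 hmin
    rw [hB]
    simpa [PySem.Set.empty] using hA
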